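-- pv_equiv track=rewrite | github.com/aleksandermagi-dev/Lumen.AIv2 | src/lumen/reasoning/memory_retrieval_layer.py | _is_project_return_prompt
-- ===== SOURCE A (Python) =====
-- def _is_project_return_prompt(normalized_prompt: str) -> bool:
--     if not normalized_prompt:
--         return False
--     project_return_cues = (
--         "back to ",
--         "where were we on ",
--         "continue the ",
--         "continue with ",
--         "what was our last take on ",
--         "pick back up ",
--         "pick back up on ",
--         "return to ",
--         "resume the ",
--     )
--     return any(cue in normalized_prompt for cue in project_return_cues)
-- ===== SOURCE B (Python) =====
-- _PROJECT_RETURN_CUES = (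
--     "back to ",
--     "where were we on ",
--     "continue the ",
--     "continue with ",
--     "what was our last take on ",
--     "pick back up ",
--     "pick back up on ",
--     "return to ",
--     "resume the ",
-- )
--
--
-- def _is_project_return_prompt(normalized_prompt: str) -> bool:
--     # Single left-to-right pass: at each position, test whether some cue
--     # starts there, instead of nine independent substring scans.
--     for i in range(len(normalized_prompt)):
--         for cue in _PROJECT_RETURN_CUES:
--             if normalized_prompt.startswith(cue, i):
--                 return True
--     return False
-- ===== Notes on version B (the rewrite author's own statement) =====
-- stated objective: alternative
-- what changed: B makes one left-to-right pass over the prompt, testing at each position whether any cue starts there, instead of A's nine independent full substring scans (one per cue); the empty-string guard disappears because the position loop is already empty.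
import Mathlib
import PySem

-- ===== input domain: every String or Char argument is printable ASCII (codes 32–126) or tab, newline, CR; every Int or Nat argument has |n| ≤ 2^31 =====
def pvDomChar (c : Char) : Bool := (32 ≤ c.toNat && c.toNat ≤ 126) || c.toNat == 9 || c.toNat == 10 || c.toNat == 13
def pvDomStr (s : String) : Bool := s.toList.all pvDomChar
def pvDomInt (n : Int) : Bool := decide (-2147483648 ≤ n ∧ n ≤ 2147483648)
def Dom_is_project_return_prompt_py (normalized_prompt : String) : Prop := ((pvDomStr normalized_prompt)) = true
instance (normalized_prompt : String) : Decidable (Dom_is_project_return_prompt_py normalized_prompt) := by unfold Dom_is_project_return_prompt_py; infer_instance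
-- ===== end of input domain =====

-- B replaces A's nine independent substring scans by one left-to-right pass
-- testing at each position whether any cue starts there (objective: alternative).

-- ===== PORT A =====
def pvCuesA : List String :=
  ["back to ", "where were we on ", "continue the ", "continue with ",
   "what was our last take on ", "pick back up ", "pick back up on ",
   "return to ", "resume the "]

def is_project_return_prompt_py (normalized_prompt : String) : Bool :=
  if normalized_prompt = "" then false
  else pvCuesA.any (fun cue => PySem.Str.isIn cue normalized_prompt)

-- ===== PORT B =====
def pvCuesB : List String :=
  ["back to ", "where were we on ", "continue the ", "continue with ",
   "what was our last take on ", "pick back up ", "pick back up on ",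
   "return to ", "resume the "]

-- the position loop: at each suffix, does any cue start here?
def pvScanB (cues : List (List Char)) : List Char → Bool
  | [] => false
  | c :: rest =>
    if cues.any (fun cue => PySem.Chars.startswith (c :: rest) cue) then true
    else pvScanB cues rest

def is_project_return_prompt_py_alt (normalized_prompt : String) : Bool :=
  pvScanB (pvCuesB.map String.toList) normalized_prompt.toList

-- ===== PRECONDITION & SPEC =====
def Spec_is_project_return_prompt_py (normalized_prompt : String) (out : Bool) : Prop := out = is_project_return_prompt_py_alt normalized_prompt
instance (normalized_prompt : String) (out : Bool) : Decidable (Spec_is_project_return_prompt_py normalized_prompt out) := by unfold Spec_is_project_return_prompt_py; infer_instance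

-- ===== CLAIM (what is proved, stated in full; the proofs are below) =====
def Claim_equal_is_project_return_prompt_py : Prop := ∀ (normalized_prompt : String), Dom_is_project_return_prompt_py normalized_prompt → Spec_is_project_return_prompt_py normalized_prompt (is_project_return_prompt_py normalized_prompt)

-- ===== LEMMAS AND PROOFS =====

-- the scan finds a match iff some (nonempty) cue is an infix of the suffix list
theorem pvScanB_iff (cues : List (List Char)) (h : ∀ c ∈ cues, c ≠ [])
    (s : List Char) : pvScanB cues s = true ↔ ∃ c ∈ cues, c <:+: s := by
  induction s with
  | nil =>
    simp only [pvScanB, List.infix_nil]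
    constructor
    · intro hf; cases hf
    · rintro ⟨c, hc, rfl⟩; exact absurd rfl (h _ hc)
  | cons a rest ih =>
    simp only [pvScanB, List.any_eq_true, PySem.Chars.startswith_iff]
    by_cases hp : ∃ c ∈ cues, c <+: a :: rest
    · simp only [if_pos hp, true_iff]
      obtain ⟨c, hc, hpre⟩ := hp
      exact ⟨c, hc, hpre.isInfix⟩
    · simp only [if_neg hp, ih]
      constructor
      · rintro ⟨c, hc, hinf⟩; exact ⟨c, hc, (List.infix_cons_iff.mpr (Or.inr hinf))⟩
      · rintro ⟨c, hc, hinf⟩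
        rcases List.infix_cons_iff.mp hinf with hpre | hinf'
        · exact absurd ⟨c, hc, hpre⟩ hp
        · exact ⟨c, hc, hinf'⟩

-- ===== VERDICT (by name: the statement is the Claim_ definition above) =====
theorem is_project_return_prompt_py_spec : Claim_equal_is_project_return_prompt_py := by
  intro s _hDom
  unfold Spec_is_project_return_prompt_py is_project_return_prompt_py is_project_return_prompt_py_alt
  have hne : ∀ c ∈ pvCuesB.map String.toList, c ≠ [] := by decide
  have hB := pvScanB_iff (pvCuesB.map String.toList) hne s.toList
  by_cases hs : s = ""
  · subst hs
    decide
  · rw [if_neg hs]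
    rw [Bool.eq_iff_iff]
    simp only [List.any_eq_true, PySem.Str.isIn_iff_infix]
    rw [hB]
    constructor
    · rintro ⟨c, hc, hinf⟩
      exact ⟨c.toList, List.mem_map_of_mem hc, hinf⟩
    · rintro ⟨c, hc, hinf⟩
      obtain ⟨c', hc', rfl⟩ := List.mem_map.mp hc
      exact ⟨c', hc', hinf⟩
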